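-- pv_equiv track=rewrite | github.com/Fuad-I/Project_Euler | 038 Pandigital Multiples.py | pandigital2
-- ===== SOURCE A (Python) =====
-- def pandigital2(num):
--     temp = ['0']
--     for j in range(1, 3):
--         for digit in str(num * j):
--             if digit in temp:
--                 return []
--             temp.append(digit)
--     return temp
-- ===== SOURCE B (Python) =====
-- def pandigital2(num):
--     # Arithmetic digit extraction with a bitmask of seen digits; no string scanning.
--     # Non-positive num can never qualify (str(num) has '0' or a repeated '-'), so bail out.
--     if num <= 0:
--         return []
--     digits = ['0']
--     mask = 0
--     for m in (num, 2 * num):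
--         block = []
--         while m:
--             m, d = divmod(m, 10)
--             if d == 0 or mask >> d & 1:
--                 return []
--             mask |= 1 << d
--             block.append(str(d))
--         digits += reversed(block)
--     return digits
-- ===== Notes on version B (the rewrite author's own statement) =====
-- stated objective: alternative
-- what changed: B never builds or scans the decimal strings: it extracts the digits of the number and its double arithmetically with divmod by ten and detects zero or repeated digits via a single integer bitmask of seen digits, building the result blocks in reverse, where A iterates over the characters of each str() value and re-searches a growing list of seen characters for every digit.
import Mathlib
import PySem

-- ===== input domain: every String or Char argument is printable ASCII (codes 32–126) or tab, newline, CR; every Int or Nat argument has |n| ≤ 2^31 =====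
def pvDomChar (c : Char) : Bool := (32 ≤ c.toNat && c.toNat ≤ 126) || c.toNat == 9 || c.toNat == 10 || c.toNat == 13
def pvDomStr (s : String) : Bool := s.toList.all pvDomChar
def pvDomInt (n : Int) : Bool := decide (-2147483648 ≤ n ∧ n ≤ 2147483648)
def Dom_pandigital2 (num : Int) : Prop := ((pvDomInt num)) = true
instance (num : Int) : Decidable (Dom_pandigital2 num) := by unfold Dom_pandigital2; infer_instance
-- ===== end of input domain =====

-- B checks the digits of num and 2*num arithmetically (divmod by 10) against a bitmask of
-- already-seen digits, instead of A's string scan that re-searches a growing list of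
-- one-character strings (objective: alternative).

-- ===== PORT A =====
-- A's digit loop over one str(num*j), threading temp; none = the early 'return []' fired
def pvScanA (temp : List String) : List Char → Option (List String)
  | [] => some temp
  | c :: rest =>
    if temp.contains (String.ofList [c]) then none
    else pvScanA (temp ++ [String.ofList [c]]) rest

def pandigital2 (num : Int) : List String :=
  match pvScanA ["0"] (PySem.Int.toStr (num * 1)).toList with
  | none => []
  | some t =>
    match pvScanA t (PySem.Int.toStr (num * 2)).toList with
    | none => []
    | some t2 => t2

-- ===== PORT B =====
-- B's 'while m:' loop; m ≥ 0 always holds in B (the num ≤ 0 guard fires first), so the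
-- loop variable is a Nat and Python's divmod(m, 10) is Nat's / and % (floor division on
-- nonnegative ints). none = the early 'return []' fired.
def pvExtract (m : Nat) (mask : Nat) (block : List String) : Option (Nat × List String) :=
  if _hm : m = 0 then some (mask, block)
  else
    let d := m % 10
    if d = 0 ∨ (mask >>> d) &&& 1 ≠ 0 then none
    else pvExtract (m / 10) (mask ||| (1 <<< d)) (block ++ [PySem.Int.toStr (d : Int)])
  termination_by m
  decreasing_by exact Nat.div_lt_self (Nat.pos_of_ne_zero _hm) (by norm_num)

def pandigital2_alt (num : Int) : List String :=
  if num ≤ 0 then []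
  else
    match pvExtract num.toNat 0 [] with
    | none => []
    | some (mask1, b1) =>
      match pvExtract (2 * num).toNat mask1 [] with
      | none => []
      | some (_, b2) => ["0"] ++ b1.reverse ++ b2.reverse

-- ===== PRECONDITION & SPEC =====
def Spec_pandigital2 (num : Int) (out : List String) : Prop := out = pandigital2_alt num
instance (num : Int) (out : List String) : Decidable (Spec_pandigital2 num out) := by unfold Spec_pandigital2; infer_instance

-- ===== CLAIM (what is proved, stated in full; the proofs are below) =====
def Claim_equal_pandigital2 : Prop := ∀ (num : Int), Dom_pandigital2 num → Spec_pandigital2 num (pandigital2 num)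

-- ===== LEMMAS AND PROOFS =====

-- A-side: characterising pvScanA
theorem pvSing_inj : Function.Injective (fun c : Char => String.ofList [c]) := by
  intro a b h
  have := congrArg String.toList h
  simpa using this

theorem pvNodup_map_sing (xs : List Char) :
    (xs.map (fun c => String.ofList [c])).Nodup ↔ xs.Nodup :=
  List.nodup_map_iff pvSing_inj

theorem pvMem_map_sing (xs : List Char) :
    ("0" : String) ∈ xs.map (fun c => String.ofList [c]) ↔ '0' ∈ xs := by
  constructor
  · intro hm
    rcases List.mem_map.mp hm with ⟨c, hc, he⟩
    have : c = '0' := by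
      have := congrArg String.toList he
      simpa using this
    exact this ▸ hc
  · intro hm
    exact List.mem_map_of_mem hm

theorem pvCons_nodup_iff (xs : List Char) :
    (("0" : String) :: xs.map (fun c => String.ofList [c])).Nodup ↔ ('0' ∉ xs ∧ xs.Nodup) := by
  rw [List.nodup_cons, pvNodup_map_sing, pvMem_map_sing]

theorem pvScanA_spec (cs : List Char) : ∀ (temp : List String), temp.Nodup →
    pvScanA temp cs =
      if (temp ++ cs.map (fun c => String.ofList [c])).Nodup
      then some (temp ++ cs.map (fun c => String.ofList [c])) else none := by
  induction cs with
  | nil => intro temp h; simp [pvScanA, h]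
  | cons c rest ih =>
    intro temp h
    by_cases hc : String.ofList [c] ∈ temp
    · have hnd : ¬ (temp ++ (c :: rest).map (fun c => String.ofList [c])).Nodup := by
        intro hnd
        exact (List.disjoint_of_nodup_append hnd) hc (by simp)
      simp only [List.map_cons] at hnd
      simp [pvScanA, hc, hnd]
    · have hdisj : List.Disjoint temp [String.ofList [c]] := by
        intro a ha hb
        simp only [List.mem_singleton] at hb
        exact hc (hb ▸ ha)
      have hnd' : (temp ++ [String.ofList [c]]).Nodup :=
        h.append (List.nodup_singleton _) hdisj
      simp [pvScanA, hc, ih _ hnd', List.append_assoc]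

-- A as a whole: empty unless the concatenated digit characters are nonzero and distinct
theorem pandigital2_eq (num : Int) :
    pandigital2 num =
      if '0' ∈ (PySem.Int.toStr (num * 1)).toList ++ (PySem.Int.toStr (num * 2)).toList
          ∨ ¬ ((PySem.Int.toStr (num * 1)).toList ++ (PySem.Int.toStr (num * 2)).toList).Nodup
      then []
      else "0" :: ((PySem.Int.toStr (num * 1)).toList ++ (PySem.Int.toStr (num * 2)).toList).map
          (fun c => String.ofList [c]) := by
  unfold pandigital2
  set cs1 := (PySem.Int.toStr (num * 1)).toList with hcs1
  set cs2 := (PySem.Int.toStr (num * 2)).toList with hcs2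
  rw [pvScanA_spec cs1 ["0"] (by simp)]
  by_cases H : '0' ∉ cs1 ++ cs2 ∧ (cs1 ++ cs2).Nodup
  · have h1 : ((["0"] : List String) ++ cs1.map (fun c => String.ofList [c])).Nodup := by
      rw [List.singleton_append, pvCons_nodup_iff]
      exact ⟨fun hm => H.1 (List.mem_append_left _ hm), H.2.of_append_left⟩
    rw [if_pos h1]
    dsimp only
    rw [pvScanA_spec cs2 _ h1]
    have h2 : (((["0"] : List String) ++ cs1.map (fun c => String.ofList [c]))
        ++ cs2.map (fun c => String.ofList [c])).Nodup := by
      have := (pvCons_nodup_iff (cs1 ++ cs2)).mpr ⟨H.1, H.2⟩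
      simpa [List.map_append, List.append_assoc] using this
    rw [if_pos h2]
    dsimp only
    rw [if_neg (not_or.mpr ⟨H.1, fun h => h H.2⟩)]
    simp [List.map_append]
  · have Hor : '0' ∈ cs1 ++ cs2 ∨ ¬ (cs1 ++ cs2).Nodup := by tauto
    rw [if_pos Hor]
    by_cases h1 : ((["0"] : List String) ++ cs1.map (fun c => String.ofList [c])).Nodup
    · rw [if_pos h1]
      dsimp only
      rw [pvScanA_spec cs2 _ h1]
      have h2 : ¬ (((["0"] : List String) ++ cs1.map (fun c => String.ofList [c]))
          ++ cs2.map (fun c => String.ofList [c])).Nodup := by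
        intro h2
        have : (("0" : String) :: (cs1 ++ cs2).map (fun c => String.ofList [c])).Nodup := by
          simpa [List.map_append, List.append_assoc] using h2
        exact H ((pvCons_nodup_iff _).mp this)
      rw [if_neg h2]
    · rw [if_neg h1]

-- digit characters
theorem pvDC_inj (a b : Nat) (ha : a < 10) (hb : b < 10)
    (h : Nat.digitChar a = Nat.digitChar b) : a = b := by
  interval_cases a <;> interval_cases b <;> first | rfl | exact absurd h (by decide)

theorem pvDC_zero_iff (d : Nat) (hd : d < 10) : Nat.digitChar d = '0' ↔ d = 0 := by
  interval_cases d <;> decide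

theorem pvToDigits_single (d : Nat) (hd : d < 10) :
    Nat.toDigits 10 d = [Nat.digitChar d] := by
  interval_cases d <;> rfl

-- Nat.toDigits as Mathlib's little-endian digits, reversed and mapped to characters
theorem pvToDigitsCore_eq (n : Nat) : 0 < n → ∀ (fuel : Nat) (ds : List Char), n ≤ fuel →
    Nat.toDigitsCore 10 fuel n ds = ((Nat.digits 10 n).map Nat.digitChar).reverse ++ ds := by
  induction n using Nat.strong_induction_on with
  | _ n ih =>
    intro hn fuel ds hfuel
    match fuel with
    | 0 => omega
    | f + 1 =>
      rw [Nat.digits_def' (by norm_num : (1:Nat) < 10) hn]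
      by_cases h0 : n / 10 = 0
      · simp [Nat.toDigitsCore, h0, Nat.digits_zero]
      · have hlt : n / 10 < n := Nat.div_lt_self hn (by norm_num)
        have := ih (n / 10) hlt (Nat.pos_of_ne_zero h0) f (Nat.digitChar (n % 10) :: ds)
          (by omega)
        simp [Nat.toDigitsCore, h0, this,
          Nat.digits_def' (by norm_num : (1:Nat) < 10) (Nat.pos_of_ne_zero h0)]

theorem pvToDigits_eq (n : Nat) (hn : 0 < n) :
    Nat.toDigits 10 n = ((Nat.digits 10 n).map Nat.digitChar).reverse := by
  have := pvToDigitsCore_eq n hn (n + 1) [] (by omega)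
  simpa [Nat.toDigits] using this

theorem pvToChars_pos (v : Int) (hv : 0 < v) :
    PySem.Int.toChars v = ((Nat.digits 10 v.toNat).map Nat.digitChar).reverse := by
  rw [PySem.Int.toChars, if_neg (by omega), pvToDigits_eq v.toNat (by omega)]

-- str(d) of a single digit is its character
theorem pvToStr_digit (d : Nat) (hd : d < 10) :
    PySem.Int.toStr (d : Int) = String.ofList [Nat.digitChar d] := by
  rw [PySem.Int.toStr, PySem.Int.toChars, if_neg (by omega)]
  simp [pvToDigits_single d hd]

-- bitmask facts
theorem pvTest_iff (m d : Nat) : ((m >>> d) &&& 1 ≠ 0) ↔ m.testBit d := by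
  simp [Nat.testBit, Nat.and_comm]

theorem pvTest_shift (d j : Nat) : (1 <<< d).testBit j ↔ j = d := by
  simp [Nat.shiftLeft_eq, Nat.testBit_two_pow, eq_comm]

theorem pvMaskOf_testBit (l : List Nat) : ∀ (mask j : Nat),
    (l.foldl (fun mk d => mk ||| (1 <<< d)) mask).testBit j ↔ mask.testBit j ∨ j ∈ l := by
  induction l with
  | nil => simp
  | cons d rest ih =>
    intro mask j
    simp only [List.foldl_cons, ih, Nat.testBit_or, List.mem_cons]
    rw [Bool.or_eq_true, pvTest_shift]
    tauto

-- B's extraction loop: succeeds iff the digits are nonzero, distinct and unseen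
theorem pvExtract_spec (n : Nat) : ∀ (mask : Nat) (block : List String),
    pvExtract n mask block =
      if (Nat.digits 10 n).Nodup ∧ ∀ d ∈ Nat.digits 10 n, d ≠ 0 ∧ ¬ mask.testBit d
      then some ((Nat.digits 10 n).foldl (fun mk d => mk ||| (1 <<< d)) mask,
        block ++ (Nat.digits 10 n).map (fun d : Nat => PySem.Int.toStr (d : Int)))
      else none := by
  induction n using Nat.strong_induction_on with
  | _ n ih =>
    intro mask block
    by_cases hn : n = 0
    · subst hn; simp [pvExtract, Nat.digits_zero]
    · have hpos : 0 < n := Nat.pos_of_ne_zero hn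
      rw [Nat.digits_def' (by norm_num : (1:Nat) < 10) hpos]
      rw [pvExtract]
      rw [dif_neg hn]
      by_cases hfail : n % 10 = 0 ∨ (mask >>> (n % 10)) &&& 1 ≠ 0
      · rw [if_pos hfail]
        have : ¬ ((n % 10 :: Nat.digits 10 (n / 10)).Nodup ∧
            ∀ d ∈ n % 10 :: Nat.digits 10 (n / 10), d ≠ 0 ∧ ¬ mask.testBit d) := by
          rintro ⟨-, hall⟩
          rcases hall (n % 10) (List.mem_cons_self ..) with ⟨hne, hbit⟩
          rcases hfail with h | h
          · exact hne h
          · exact hbit ((pvTest_iff mask (n % 10)).mp h)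
        rw [if_neg this]
      · rw [if_neg hfail]
        push Not at hfail
        obtain ⟨hd0, hdb⟩ := hfail
        have hdbit : ¬ mask.testBit (n % 10) := fun h => ((pvTest_iff mask (n % 10)).mpr h) hdb
        rw [ih (n / 10) (Nat.div_lt_self hpos (by norm_num)) (mask ||| (1 <<< (n % 10)))
          (block ++ [PySem.Int.toStr ((n % 10 : Nat) : Int)])]
        have hcond : ((Nat.digits 10 (n / 10)).Nodup ∧
              ∀ d ∈ Nat.digits 10 (n / 10), d ≠ 0 ∧ ¬ (mask ||| (1 <<< (n % 10))).testBit d) ↔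
            ((n % 10 :: Nat.digits 10 (n / 10)).Nodup ∧
              ∀ d ∈ n % 10 :: Nat.digits 10 (n / 10), d ≠ 0 ∧ ¬ mask.testBit d) := by
          simp only [List.nodup_cons, List.mem_cons, Nat.testBit_or, Bool.or_eq_true,
            pvTest_shift]
          constructor
          · rintro ⟨hnd, hall⟩
            refine ⟨⟨fun hmem => ((hall _ hmem).2 (Or.inr rfl)), hnd⟩, ?_⟩
            rintro d (rfl | hmem)
            · exact ⟨hd0, hdbit⟩
            · exact ⟨(hall d hmem).1, fun h => (hall d hmem).2 (Or.inl h)⟩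
          · rintro ⟨⟨hnmem, hnd⟩, hall⟩
            refine ⟨hnd, fun d hmem => ?_⟩
            rcases hall d (Or.inr hmem) with ⟨h1, h2⟩
            refine ⟨h1, ?_⟩
            rintro (h | rfl)
            · exact h2 h
            · exact hnmem hmem
        rw [if_congr hcond rfl rfl]
        simp [List.append_assoc]

-- membership / nodup transfer between digit lists and their character lists
theorem pvZero_mem_chars (l : List Nat) (hl : ∀ d ∈ l, d < 10) :
    '0' ∈ (l.map Nat.digitChar).reverse ↔ 0 ∈ l := by
  simp only [List.mem_reverse, List.mem_map]
  constructor
  · rintro ⟨d, hd, he⟩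
    exact ((pvDC_zero_iff d (hl d hd)).mp he) ▸ hd
  · intro h
    exact ⟨0, h, rfl⟩

theorem pvNodup_chars (l : List Nat) (hl : ∀ d ∈ l, d < 10) :
    (l.map Nat.digitChar).reverse.Nodup ↔ l.Nodup := by
  rw [List.nodup_reverse]
  constructor
  · exact List.Nodup.of_map _
  · intro h
    exact h.map_on (fun a ha b hb he => pvDC_inj a b (hl a ha) (hl b hb) he)

-- ===== VERDICT (by name: the statement is the Claim_ definition above) =====
theorem pandigital2_spec : Claim_equal_pandigital2 := by
  intro num _
  unfold Spec_pandigital2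
  rw [pandigital2_eq]
  unfold pandigital2_alt
  by_cases hpos : num ≤ 0
  · rw [if_pos hpos]
    by_cases h0 : num = 0
    · subst h0
      rw [if_pos (by decide)]
    · -- num < 0: both strings start with '-', so the characters repeat
      have hneg1 : num * 1 < 0 := by omega
      have hneg2 : num * 2 < 0 := by omega
      have m1 : '-' ∈ (PySem.Int.toStr (num * 1)).toList := by
        rw [PySem.Int.toList_toStr, PySem.Int.toChars, if_pos hneg1]
        exact List.mem_cons_self ..
      have m2 : '-' ∈ (PySem.Int.toStr (num * 2)).toList := by
        rw [PySem.Int.toList_toStr, PySem.Int.toChars, if_pos hneg2]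
        exact List.mem_cons_self ..
      rw [if_pos (Or.inr (fun hnd => (List.disjoint_of_nodup_append hnd) m1 m2))]
  · -- num > 0
    have h1 : (0:Int) < num := by omega
    have e1 : (PySem.Int.toStr (num * 1)).toList
        = ((Nat.digits 10 num.toNat).map Nat.digitChar).reverse := by
      rw [PySem.Int.toList_toStr, mul_one, pvToChars_pos num h1]
    have e2 : (PySem.Int.toStr (num * 2)).toList
        = ((Nat.digits 10 (2 * num).toNat).map Nat.digitChar).reverse := by
      rw [PySem.Int.toList_toStr, show num * 2 = 2 * num from mul_comm num 2,
        pvToChars_pos (2 * num) (by omega)]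
    rw [e1, e2, if_neg hpos, pvExtract_spec]
    set da := Nat.digits 10 num.toNat with hda'
    set db := Nat.digits 10 (2 * num).toNat with hdb'
    have hA : ∀ d ∈ da, d < 10 := fun d h => Nat.digits_lt_base (by norm_num) h
    have hB : ∀ d ∈ db, d < 10 := fun d h => Nat.digits_lt_base (by norm_num) h
    have c1iff : (da.Nodup ∧ ∀ d ∈ da, d ≠ 0 ∧ ¬ (0:Nat).testBit d)
        ↔ (da.Nodup ∧ ∀ d ∈ da, d ≠ 0) := by
      simp [Nat.zero_testBit]
    rw [if_congr c1iff rfl rfl]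
    by_cases hC1 : da.Nodup ∧ ∀ d ∈ da, d ≠ 0
    · rw [if_pos hC1]
      dsimp only
      rw [pvExtract_spec]
      have c2iff : (db.Nodup ∧ ∀ d ∈ db,
            d ≠ 0 ∧ ¬ (da.foldl (fun mk d => mk ||| (1 <<< d)) 0).testBit d)
          ↔ (db.Nodup ∧ ∀ d ∈ db, d ≠ 0 ∧ d ∉ da) := by
        simp [pvMaskOf_testBit, Nat.zero_testBit]
      rw [if_congr c2iff rfl rfl]
      by_cases hC2 : db.Nodup ∧ ∀ d ∈ db, d ≠ 0 ∧ d ∉ da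
      · -- both stages succeed: A's condition is false and the outputs line up
        rw [if_pos hC2]
        have hno0 : '0' ∉ (da.map Nat.digitChar).reverse ++ (db.map Nat.digitChar).reverse := by
          intro hmem
          rcases List.mem_append.mp hmem with h | h
          · exact (hC1.2 0 ((pvZero_mem_chars da hA).mp h)) rfl
          · exact ((hC2.2 0 ((pvZero_mem_chars db hB).mp h)).1) rfl
        have hnd : ((da.map Nat.digitChar).reverse ++ (db.map Nat.digitChar).reverse).Nodup := by
          rw [List.nodup_append]
          refine ⟨(pvNodup_chars da hA).mpr hC1.1, (pvNodup_chars db hB).mpr hC2.1, ?_⟩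
          intro x hx y hy hxy
          rcases List.mem_map.mp (List.mem_reverse.mp hx) with ⟨d, hd, rfl⟩
          rcases List.mem_map.mp (List.mem_reverse.mp hy) with ⟨e, he, rfl⟩
          have : d = e := pvDC_inj d e (hA d hd) (hB e he) hxy
          exact (hC2.2 e he).2 (this ▸ hd)
        rw [if_neg (not_or.mpr ⟨hno0, fun h => h hnd⟩)]
        have m1 : da.map (fun d : Nat => PySem.Int.toStr (d : Int))
            = (da.map Nat.digitChar).map (fun c => String.ofList [c]) := by
          rw [List.map_map]
          exact List.map_congr_left (fun d hd => pvToStr_digit d (hA d hd))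
        have m2 : db.map (fun d : Nat => PySem.Int.toStr (d : Int))
            = (db.map Nat.digitChar).map (fun c => String.ofList [c]) := by
          rw [List.map_map]
          exact List.map_congr_left (fun d hd => pvToStr_digit d (hB d hd))
        simp [m1, m2, List.map_reverse, List.map_map, ← hdb']
      · -- second stage fails: some digit of 2*num is zero, repeated or shared with num
        rw [if_neg hC2]
        rw [if_pos ?_]
        push Not at hC2
        by_cases hdup : db.Nodup
        · rcases hC2 hdup with ⟨d, hd, hbad⟩
          by_cases hz : d = 0
          · exact Or.inl (List.mem_append_right _
              ((pvZero_mem_chars db hB).mpr (hz ▸ hd)))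
          · have hin : d ∈ da := by tauto
            refine Or.inr (fun hnd => ?_)
            have hx : Nat.digitChar d ∈ (da.map Nat.digitChar).reverse :=
              List.mem_reverse.mpr (List.mem_map_of_mem hin)
            have hy : Nat.digitChar d ∈ (db.map Nat.digitChar).reverse :=
              List.mem_reverse.mpr (List.mem_map_of_mem hd)
            exact (List.disjoint_of_nodup_append hnd) hx hy
        · refine Or.inr (fun hnd => ?_)
          exact hdup ((pvNodup_chars db hB).mp ((List.nodup_append.mp hnd).2.1))
    · -- first stage fails: some digit of num is zero or repeated
      rw [if_neg hC1]
      rw [if_pos ?_]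
      push Not at hC1
      by_cases hdup : da.Nodup
      · rcases hC1 hdup with ⟨d, hd, hz⟩
        exact Or.inl (List.mem_append_left _ ((pvZero_mem_chars da hA).mpr (hz ▸ hd)))
      · refine Or.inr (fun hnd => ?_)
        exact hdup ((pvNodup_chars da hA).mp ((List.nodup_append.mp hnd).1))
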